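-- pv_equiv track=rewrite | github.com/shpatmjeku/Edit-Distance-with-Autocorrect-and-Phrase-Suggestions_23 | main.py | phrase_edit_distance
-- ===== SOURCE A (Python) =====
-- def edit_distance(word1: str, word2: str) -> int:
--     m = len(word1)
--     n = len(word2)
--
--     dp = [[0] * (n + 1) for _ in range(m + 1)]
--
--     for i in range(m + 1):
--         dp[i][0] = i
--     for j in range(n + 1):
--         dp[0][j] = j
--
--     for i in range(1, m + 1):
--         for j in range(1, n + 1):
--             if word1[i - 1] == word2[j - 1]:
--                 dp[i][j] = dp[i - 1][j - 1]
--             else: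
--                 dp[i][j] = 1 + min(
--                     dp[i - 1][j],    # fshirje
--                     dp[i][j - 1],    # shtim
--                     dp[i - 1][j - 1] # zëvendësim
--                 )
--
--     return dp[m][n]
--
-- def phrase_edit_distance(phrase1: str, phrase2: str) -> int:
--     words1 = phrase1.strip().split()
--     words2 = phrase2.strip().split()
--
--     m, n = len(words1), len(words2)
--     # Kosto operacionesh në nivel fraze
--     insert_delete_cost = 2
--
--     dp = [[0]*(n+1) for _ in range(m+1)]
--
--     for i in range(1, m+1):
--         dp[i][0] = dp[i-1][0] + insert_delete_cost
--
--     for j in range(1, n+1):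
--         dp[0][j] = dp[0][j-1] + insert_delete_cost
--
--     for i in range(1, m+1):
--         for j in range(1, n+1):
--             if words1[i-1] == words2[j-1]:
--                 dp[i][j] = dp[i-1][j-1]
--             else:
--                 replace_cost = edit_distance(words1[i-1], words2[j-1])
--                 # Sigurohemi që zëvendësimi të ketë të paktën koston 1
--                 replace_cost = max(1, replace_cost)
--                 dp[i][j] = min(
--                     dp[i-1][j] + insert_delete_cost,       # fshirje e një fjale
--                     dp[i][j-1] + insert_delete_cost,       # shtim i një fjale
--                     dp[i-1][j-1] + replace_cost            # zëvendësim i një fjale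
--                 )
--
--     return dp[m][n]
-- ===== SOURCE B (Python) =====
-- def edit_distance(word1: str, word2: str) -> int:
--     # Top-down memoized recursion instead of a bottom-up table.
--     memo = {}
--
--     def ed(i, j):
--         if i == 0:
--             return j
--         if j == 0:
--             return i
--         if (i, j) not in memo:
--             if word1[i - 1] == word2[j - 1]:
--                 memo[(i, j)] = ed(i - 1, j - 1)
--             else:
--                 memo[(i, j)] = 1 + min(ed(i - 1, j), ed(i, j - 1), ed(i - 1, j - 1))
--         return memo[(i, j)]
--
--     return ed(len(word1), len(word2))
--
--
-- def phrase_edit_distance(phrase1: str, phrase2: str) -> int: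
--     words1 = phrase1.strip().split()
--     words2 = phrase2.strip().split()
--     memo = {}
--
--     def pd(i, j):
--         if i == 0:
--             return 2 * j
--         if j == 0:
--             return 2 * i
--         if (i, j) not in memo:
--             if words1[i - 1] == words2[j - 1]:
--                 memo[(i, j)] = pd(i - 1, j - 1)
--             else:
--                 sub = max(1, edit_distance(words1[i - 1], words2[j - 1]))
--                 memo[(i, j)] = min(pd(i - 1, j) + 2, pd(i, j - 1) + 2, pd(i - 1, j - 1) + sub)
--         return memo[(i, j)]
--
--     return pd(len(words1), len(words2))
-- ===== Notes on version B (the rewrite author's own statement) =====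
-- stated objective: alternative
-- what changed: Both bottom-up DP tables (with their explicit boundary-initialisation loops and index-ordered fills) are replaced by demand-driven top-down recursion with a dictionary memo-cache, at the character level and at the word level; only subproblems actually reachable from (m,n) are computed, and the equal-word/equal-char fast path skips whole regions of the table.
import Mathlib
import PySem

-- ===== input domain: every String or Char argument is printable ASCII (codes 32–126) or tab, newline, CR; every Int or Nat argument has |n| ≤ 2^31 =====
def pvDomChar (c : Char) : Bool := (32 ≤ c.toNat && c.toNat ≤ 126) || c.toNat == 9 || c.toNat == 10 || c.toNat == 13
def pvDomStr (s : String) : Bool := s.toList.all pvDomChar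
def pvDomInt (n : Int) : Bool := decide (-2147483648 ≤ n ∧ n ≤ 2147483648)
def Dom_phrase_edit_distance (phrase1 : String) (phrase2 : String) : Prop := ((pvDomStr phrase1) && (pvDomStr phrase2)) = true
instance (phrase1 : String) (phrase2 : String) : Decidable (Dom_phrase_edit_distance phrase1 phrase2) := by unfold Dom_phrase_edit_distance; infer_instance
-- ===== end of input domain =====

-- B replaces both bottom-up DP tables by demand-driven top-down memoized recursion (dict cache) at the char and the word level; same results, no speed claim.

-- ===== PORT A =====
-- dp[i][j] read/write on the list-of-lists matrix (indices are the loop counters, always ≥ 0, so Nat)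
def get2 (dp : List (List Int)) (i j : Nat) : Int := (dp.getD i []).getD j 0
def set2 (dp : List (List Int)) (i j : Nat) (v : Int) : List (List Int) := dp.set i ((dp.getD i []).set j v)

-- literal port of A's edit_distance (full (m+1)×(n+1) table)
def edit_distance (word1 : String) (word2 : String) : Int :=
  let w1 := word1.toList
  let w2 := word2.toList
  let m := w1.length
  let n := w2.length
  let dp := List.replicate (m+1) (List.replicate (n+1) (0 : Int))
  -- for i in range(m+1): dp[i][0] = i
  let dp := (List.range (m+1)).foldl (fun dp i => set2 dp i 0 (i : Int)) dp
  -- for j in range(n+1): dp[0][j] = j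
  let dp := (List.range (n+1)).foldl (fun dp j => set2 dp 0 j (j : Int)) dp
  -- for i in range(1, m+1): for j in range(1, n+1): …
  let dp := (List.range' 1 m).foldl (fun dp i =>
      (List.range' 1 n).foldl (fun dp j =>
        if w1[i-1]? = w2[j-1]? then
          set2 dp i j (get2 dp (i-1) (j-1))
        else
          set2 dp i j (1 + min (get2 dp (i-1) j) (min (get2 dp i (j-1)) (get2 dp (i-1) (j-1))))) dp) dp
  get2 dp m n

-- literal port of A's phrase_edit_distance
def phrase_edit_distance (phrase1 : String) (phrase2 : String) : Int :=
  let words1 := PySem.Str.split₀ (PySem.Str.strip phrase1)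
  let words2 := PySem.Str.split₀ (PySem.Str.strip phrase2)
  let m := words1.length
  let n := words2.length
  let insert_delete_cost : Int := 2
  let dp := List.replicate (m+1) (List.replicate (n+1) (0 : Int))
  -- for i in range(1, m+1): dp[i][0] = dp[i-1][0] + insert_delete_cost
  let dp := (List.range' 1 m).foldl (fun dp i => set2 dp i 0 (get2 dp (i-1) 0 + insert_delete_cost)) dp
  -- for j in range(1, n+1): dp[0][j] = dp[0][j-1] + insert_delete_cost
  let dp := (List.range' 1 n).foldl (fun dp j => set2 dp 0 j (get2 dp 0 (j-1) + insert_delete_cost)) dp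
  let dp := (List.range' 1 m).foldl (fun dp i =>
      (List.range' 1 n).foldl (fun dp j =>
        if words1[i-1]? = words2[j-1]? then
          set2 dp i j (get2 dp (i-1) (j-1))
        else
          let replace_cost := edit_distance (words1.getD (i-1) "") (words2.getD (j-1) "")
          let replace_cost := max 1 replace_cost
          set2 dp i j (min (get2 dp (i-1) j + insert_delete_cost)
            (min (get2 dp i (j-1) + insert_delete_cost) (get2 dp (i-1) (j-1) + replace_cost)))) dp) dp
  get2 dp m n

-- ===== PORT B =====
-- literal port of Source B's inner closure ed(i, j) with its dict memo threaded through (i==0 / j==0 bases,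
-- cache lookup before computing, insert after; same branch order as the Python)
def edGo (w1 w2 : List Char) : Nat → Nat → PySem.Dict (Nat × Nat) Int → Int × PySem.Dict (Nat × Nat) Int
  | 0, j, memo => ((j : Int), memo)
  | i+1, 0, memo => (((i : Int) + 1), memo)
  | i+1, j+1, memo =>
    match memo.get? (i+1, j+1) with
    | some v => (v, memo)
    | none =>
      if w1[i]? = w2[j]? then
        let r := edGo w1 w2 i j memo
        (r.1, r.2.insert (i+1, j+1) r.1)
      else
        let r1 := edGo w1 w2 i (j+1) memo
        let r2 := edGo w1 w2 (i+1) j r1.2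
        let r3 := edGo w1 w2 i j r2.2
        let v := 1 + min r1.1 (min r2.1 r3.1)
        (v, r3.2.insert (i+1, j+1) v)
termination_by i j _ => i + j

def edit_distance_alt (word1 : String) (word2 : String) : Int :=
  (edGo word1.toList word2.toList word1.toList.length word2.toList.length PySem.Dict.empty).1

-- literal port of Source B's inner closure pd(i, j) with its dict memo threaded through
def pdGo (ws1 ws2 : List String) : Nat → Nat → PySem.Dict (Nat × Nat) Int → Int × PySem.Dict (Nat × Nat) Int
  | 0, j, memo => (2 * (j : Int), memo)
  | i+1, 0, memo => (2 * ((i : Int) + 1), memo)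
  | i+1, j+1, memo =>
    match memo.get? (i+1, j+1) with
    | some v => (v, memo)
    | none =>
      if ws1[i]? = ws2[j]? then
        let r := pdGo ws1 ws2 i j memo
        (r.1, r.2.insert (i+1, j+1) r.1)
      else
        let sub := max 1 (edit_distance_alt (ws1.getD i "") (ws2.getD j ""))
        let r1 := pdGo ws1 ws2 i (j+1) memo
        let r2 := pdGo ws1 ws2 (i+1) j r1.2
        let r3 := pdGo ws1 ws2 i j r2.2
        let v := min (r1.1 + 2) (min (r2.1 + 2) (r3.1 + sub))
        (v, r3.2.insert (i+1, j+1) v)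
termination_by i j _ => i + j

def phrase_edit_distance_alt (phrase1 : String) (phrase2 : String) : Int :=
  let words1 := PySem.Str.split₀ (PySem.Str.strip phrase1)
  let words2 := PySem.Str.split₀ (PySem.Str.strip phrase2)
  (pdGo words1 words2 words1.length words2.length PySem.Dict.empty).1

-- ===== PRECONDITION & SPEC =====
def Spec_phrase_edit_distance (phrase1 : String) (phrase2 : String) (out : Int) : Prop := out = phrase_edit_distance_alt phrase1 phrase2
instance (phrase1 : String) (phrase2 : String) (out : Int) : Decidable (Spec_phrase_edit_distance phrase1 phrase2 out) := by unfold Spec_phrase_edit_distance; infer_instance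

-- ===== CLAIM (what is proved, stated in full; the proofs are below) =====
def Claim_equal_phrase_edit_distance : Prop := ∀ (phrase1 : String) (phrase2 : String), Dom_phrase_edit_distance phrase1 phrase2 → Spec_phrase_edit_distance phrase1 phrase2 (phrase_edit_distance phrase1 phrase2)

-- ===== LEMMAS AND PROOFS =====

-- the common mathematical recurrence both programs compute: gap cost c, substitution cost r i j
def ged {α : Type} [DecidableEq α] (xs ys : List α) (c : Int) (r : Nat → Nat → Int) : Nat → Nat → Int
  | i, 0 => c * i
  | 0, j => c * j
  | (i+1), (j+1) =>
    if xs[i]? = ys[j]? then ged xs ys c r i j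
    else min (ged xs ys c r i (j+1) + c)
      (min (ged xs ys c r (i+1) j + c) (ged xs ys c r i j + r (i+1) (j+1)))
termination_by i j => i + j

theorem ged_zl {α : Type} [DecidableEq α] (xs ys : List α) (c : Int) (r : Nat → Nat → Int) (j : Nat) :
    ged xs ys c r 0 j = c * j := by
  cases j with
  | zero => rw [ged]
  | succ n => rw [ged]; omega
theorem ged_zr {α : Type} [DecidableEq α] (xs ys : List α) (c : Int) (r : Nat → Nat → Int) (i : Nat) :
    ged xs ys c r i 0 = c * i := by
  cases i <;> rw [ged]
theorem ged_succ {α : Type} [DecidableEq α] (xs ys : List α) (c : Int) (r : Nat → Nat → Int) (i j : Nat) :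
    ged xs ys c r (i+1) (j+1) = if xs[i]? = ys[j]? then ged xs ys c r i j
      else min (ged xs ys c r i (j+1) + c)
        (min (ged xs ys c r (i+1) j + c) (ged xs ys c r i j + r (i+1) (j+1))) := by
  rw [ged]

-- basic facts about get2/set2
theorem getD_set_ne {β : Type} (xs : List β) (i a : Nat) (v d : β) (h : a ≠ i) :
    (xs.set i v).getD a d = xs.getD a d := by
  rw [List.getD_eq_getElem?_getD, List.getD_eq_getElem?_getD, List.getElem?_set_ne (fun hc => h hc.symm)]

theorem getD_set_lt {β : Type} (xs : List β) (i : Nat) (v d : β) (h : i < xs.length) :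
    (xs.set i v).getD i d = v := by
  rw [List.getD_eq_getElem?_getD, List.getElem?_set_self', List.getElem?_eq_getElem h]
  simp

theorem getD_set_ge {β : Type} (xs : List β) (i : Nat) (v d : β) (h : xs.length ≤ i) :
    (xs.set i v).getD i d = xs.getD i d := by
  rw [List.set_eq_of_length_le h]

theorem length_set2 (dp : List (List Int)) (i j : Nat) (v : Int) : (set2 dp i j v).length = dp.length := by
  simp [set2]

theorem rowlen_set2 (dp : List (List Int)) (i j : Nat) (v : Int) (a : Nat) :
    ((set2 dp i j v).getD a []).length = (dp.getD a []).length := by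
  unfold set2
  by_cases hai : a = i
  · subst hai
    by_cases hi : a < dp.length
    · rw [getD_set_lt _ _ _ _ hi]; simp
    · rw [getD_set_ge _ _ _ _ (le_of_not_gt hi)]
  · rw [getD_set_ne _ _ _ _ _ hai]

theorem get2_set2_same (dp : List (List Int)) (i j : Nat) (v : Int)
    (hi : i < dp.length) (hj : j < (dp.getD i []).length) : get2 (set2 dp i j v) i j = v := by
  unfold get2 set2
  rw [getD_set_lt _ _ _ _ hi, getD_set_lt _ _ _ _ hj]

theorem get2_set2_ne (dp : List (List Int)) (i j a b : Nat) (v : Int)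
    (h : a ≠ i ∨ b ≠ j) : get2 (set2 dp i j v) a b = get2 dp a b := by
  unfold get2 set2
  by_cases hai : a = i
  · subst hai
    have hbj : b ≠ j := h.resolve_left (fun hc => hc rfl)
    by_cases hi : a < dp.length
    · rw [getD_set_lt _ _ _ _ hi, getD_set_ne _ _ _ _ _ hbj]
    · rw [getD_set_ge _ _ _ _ (le_of_not_gt hi)]
  · rw [getD_set_ne _ _ _ _ _ hai]

-- invariant for A's nested fill loop: rows < i fully computed, row i computed through column j, boundaries in place
def InvA (e : Nat → Nat → Int) (m n : Nat) (i j : Nat) (dp : List (List Int)) : Prop :=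
  dp.length = m + 1 ∧ (∀ a, a ≤ m → (dp.getD a []).length = n + 1) ∧
  (∀ a b, a ≤ m → b ≤ n → (a = 0 ∨ b = 0 ∨ a < i ∨ (a = i ∧ b ≤ j)) → get2 dp a b = e a b)

-- one generic theorem for A's nested loops (both of A's functions instantiate it)
theorem A_nested (e : Nat → Nat → Int) (m n : Nat) (f : Int → Int → Int → Nat → Nat → Int)
    (hcell : ∀ i j, 1 ≤ i → i ≤ m → 1 ≤ j → j ≤ n →
      f (e (i-1) j) (e i (j-1)) (e (i-1) (j-1)) i j = e i j)
    (dp0 : List (List Int)) (h0 : InvA e m n 0 n dp0) :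
    InvA e m n m n ((List.range' 1 m).foldl (fun dp i =>
      (List.range' 1 n).foldl (fun dp j =>
        set2 dp i j (f (get2 dp (i-1) j) (get2 dp i (j-1)) (get2 dp (i-1) (j-1)) i j)) dp) dp0) := by
  have step : ∀ i j dp, 1 ≤ i → i ≤ m → 1 ≤ j → j ≤ n → InvA e m n i (j-1) dp →
      InvA e m n i j (set2 dp i j (f (get2 dp (i-1) j) (get2 dp i (j-1)) (get2 dp (i-1) (j-1)) i j)) := by
    intro i j dp hi1 him hj1 hjn hinv
    obtain ⟨hlen, hrow, hval⟩ := hinv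
    have r1 : get2 dp (i-1) j = e (i-1) j := hval _ _ (by omega) hjn (by omega)
    have r2 : get2 dp i (j-1) = e i (j-1) := hval _ _ him (by omega) (by omega)
    have r3 : get2 dp (i-1) (j-1) = e (i-1) (j-1) := hval _ _ (by omega) (by omega) (by omega)
    refine ⟨by rw [length_set2]; exact hlen, fun a ha => by rw [rowlen_set2]; exact hrow a ha, ?_⟩
    intro a b ha hb hcond
    by_cases hab : a = i ∧ b = j
    · rw [hab.1, hab.2]
      rw [get2_set2_same _ _ _ _ (by omega) (by rw [hrow i him]; omega)]
      rw [r1, r2, r3]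
      exact hcell i j hi1 him hj1 hjn
    · rw [get2_set2_ne _ _ _ _ _ _ (by tauto)]
      refine hval a b ha hb ?_
      rcases hcond with h | h | h | ⟨h1, h2⟩
      · omega
      · omega
      · omega
      · right; right; right; exact ⟨h1, by omega⟩
  have inner : ∀ (cnt j : Nat) (dp : List (List Int)) (i : Nat), 1 ≤ i → i ≤ m → j + cnt ≤ n →
      InvA e m n i j dp →
      InvA e m n i (j + cnt) ((List.range' (j+1) cnt).foldl (fun dp j =>
        set2 dp i j (f (get2 dp (i-1) j) (get2 dp i (j-1)) (get2 dp (i-1) (j-1)) i j)) dp) := by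
    intro cnt
    induction cnt with
    | zero => intro j dp i _ _ _ h; simpa using h
    | succ cnt ih =>
      intro j dp i hi1 him hjc hinv
      rw [List.range'_succ, List.foldl_cons]
      have hst := step i (j+1) dp hi1 him (by omega) (by omega) (by simpa using hinv)
      have := ih (j+1) _ i hi1 him (by omega) hst
      have harith : j + (cnt + 1) = (j + 1) + cnt := by omega
      rw [harith]
      exact this
  have mono_row : ∀ (i : Nat) (dp : List (List Int)), InvA e m n i n dp → InvA e m n (i+1) 0 dp := by
    intro i dp ⟨h1, h2, h3⟩
    refine ⟨h1, h2, fun a b ha hb hc => h3 a b ha hb ?_⟩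
    rcases hc with h | h | h | ⟨hx, hy⟩
    · omega
    · omega
    · by_cases h' : a < i
      · omega
      · have : a = i := by omega
        right; right; right; exact ⟨this, hb⟩
    · omega
  have outer : ∀ (cnt i : Nat) (dp : List (List Int)), i + cnt ≤ m → InvA e m n i n dp →
      InvA e m n (i + cnt) n ((List.range' (i+1) cnt).foldl (fun dp i =>
        (List.range' 1 n).foldl (fun dp j =>
          set2 dp i j (f (get2 dp (i-1) j) (get2 dp i (j-1)) (get2 dp (i-1) (j-1)) i j)) dp) dp) := by
    intro cnt
    induction cnt with
    | zero => intro i dp _ h; simpa using h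
    | succ cnt ih =>
      intro i dp hic hinv
      rw [List.range'_succ, List.foldl_cons]
      have h0 := mono_row i dp hinv
      have hrow := inner n 0 dp (i+1) (by omega) (by omega) (by omega) h0
      simp only [Nat.zero_add] at hrow
      have := ih (i+1) _ (by omega) hrow
      have harith : i + (cnt + 1) = (i + 1) + cnt := by omega
      rw [harith]
      exact this
  have := outer m 0 dp0 (by omega) h0
  simpa using this

theorem get2_replicate (M N : Nat) (a b : Nat) : get2 (List.replicate M (List.replicate N (0:Int))) a b = 0 := by
  unfold get2
  simp [List.getD_eq_getElem?_getD, List.getElem?_replicate]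
  split <;> simp

theorem rowlen_replicate (M N a : Nat) (h : a < M) :
    ((List.replicate M (List.replicate N (0:Int))).getD a []).length = N := by
  rw [List.getD_eq_getElem?_getD, List.getElem?_replicate]
  simp [h]

theorem foldl_col (M N : Nat) (g : Nat → Int) (val : List (List Int) → Nat → Int) :
    ∀ (cnt s : Nat) (dp : List (List Int)),
      (∀ dp' a, s ≤ a → (∀ x, x < a → get2 dp' x 0 = g x) → val dp' a = g a) →
      dp.length = M + 1 → (∀ x, x ≤ M → (dp.getD x []).length = N + 1) →
      s + cnt ≤ M + 1 → (∀ x, x < s → get2 dp x 0 = g x) →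
      (((List.range' s cnt).foldl (fun dp i => set2 dp i 0 (val dp i)) dp).length = M + 1) ∧
      (∀ x, x ≤ M → (((List.range' s cnt).foldl (fun dp i => set2 dp i 0 (val dp i)) dp).getD x []).length = N + 1) ∧
      (∀ a, a < s + cnt → get2 ((List.range' s cnt).foldl (fun dp i => set2 dp i 0 (val dp i)) dp) a 0 = g a) ∧
      (∀ a b, b ≠ 0 ∨ a < s ∨ s + cnt ≤ a →
        get2 ((List.range' s cnt).foldl (fun dp i => set2 dp i 0 (val dp i)) dp) a b = get2 dp a b) := by
  intro cnt
  induction cnt with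
  | zero =>
    intro s dp hval hl hr _ hreads
    simp only [List.range'_zero, List.foldl_nil]
    exact ⟨hl, hr, fun a ha => hreads a (by omega), fun _ _ _ => trivial⟩
  | succ cnt ih =>
    intro s dp hval hl hr hcnt hreads
    rw [List.range'_succ, List.foldl_cons]
    have hv : val dp s = g s := hval dp s le_rfl hreads
    have hl1 : (set2 dp s 0 (val dp s)).length = M + 1 := by rw [length_set2]; exact hl
    have hr1 : ∀ x, x ≤ M → ((set2 dp s 0 (val dp s)).getD x []).length = N + 1 := by
      intro x hx; rw [rowlen_set2]; exact hr x hx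
    have hreads1 : ∀ x, x < s + 1 → get2 (set2 dp s 0 (val dp s)) x 0 = g x := by
      intro x hx
      rcases lt_or_ge x s with h | h
      · rw [get2_set2_ne _ _ _ _ _ _ (Or.inl (by omega))]; exact hreads x h
      · have : x = s := by omega
        subst this
        rw [get2_set2_same _ _ _ _ (by omega) (by rw [hr x (by omega)]; omega), hv]
    have hval1 : ∀ dp' a, s + 1 ≤ a → (∀ x, x < a → get2 dp' x 0 = g x) → val dp' a = g a :=
      fun dp' a ha hx => hval dp' a (by omega) hx
    obtain ⟨c1, c2, c3, c4⟩ := ih (s+1) _ hval1 hl1 hr1 (by omega) hreads1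
    refine ⟨c1, c2, fun a ha => ?_, fun a b hc => ?_⟩
    · exact c3 a (by omega)
    · have step1 : get2 ((List.range' (s+1) cnt).foldl (fun dp i => set2 dp i 0 (val dp i)) (set2 dp s 0 (val dp s))) a b
          = get2 (set2 dp s 0 (val dp s)) a b := by
        apply c4
        rcases hc with h | h | h
        · exact Or.inl h
        · exact Or.inr (Or.inl (by omega))
        · exact Or.inr (Or.inr (by omega))
      rw [step1, get2_set2_ne]
      rcases hc with h | h | h
      · exact Or.inr h
      · exact Or.inl (by omega)
      · exact Or.inl (by omega)

theorem foldl_row (M N : Nat) (g : Nat → Int) (val : List (List Int) → Nat → Int) :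
    ∀ (cnt s : Nat) (dp : List (List Int)),
      (∀ dp' b, s ≤ b → (∀ x, x < b → get2 dp' 0 x = g x) → val dp' b = g b) →
      dp.length = M + 1 → (∀ x, x ≤ M → (dp.getD x []).length = N + 1) →
      s + cnt ≤ N + 1 → (∀ x, x < s → get2 dp 0 x = g x) →
      (((List.range' s cnt).foldl (fun dp j => set2 dp 0 j (val dp j)) dp).length = M + 1) ∧
      (∀ x, x ≤ M → (((List.range' s cnt).foldl (fun dp j => set2 dp 0 j (val dp j)) dp).getD x []).length = N + 1) ∧
      (∀ b, b < s + cnt → get2 ((List.range' s cnt).foldl (fun dp j => set2 dp 0 j (val dp j)) dp) 0 b = g b) ∧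
      (∀ a b, a ≠ 0 ∨ b < s ∨ s + cnt ≤ b →
        get2 ((List.range' s cnt).foldl (fun dp j => set2 dp 0 j (val dp j)) dp) a b = get2 dp a b) := by
  intro cnt
  induction cnt with
  | zero =>
    intro s dp hval hl hr _ hreads
    simp only [List.range'_zero, List.foldl_nil]
    exact ⟨hl, hr, fun b hb => hreads b (by omega), fun _ _ _ => trivial⟩
  | succ cnt ih =>
    intro s dp hval hl hr hcnt hreads
    rw [List.range'_succ, List.foldl_cons]
    have hv : val dp s = g s := hval dp s le_rfl hreads
    have hl1 : (set2 dp 0 s (val dp s)).length = M + 1 := by rw [length_set2]; exact hl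
    have hr1 : ∀ x, x ≤ M → ((set2 dp 0 s (val dp s)).getD x []).length = N + 1 := by
      intro x hx; rw [rowlen_set2]; exact hr x hx
    have hreads1 : ∀ x, x < s + 1 → get2 (set2 dp 0 s (val dp s)) 0 x = g x := by
      intro x hx
      rcases lt_or_ge x s with h | h
      · rw [get2_set2_ne _ _ _ _ _ _ (Or.inr (by omega))]; exact hreads x h
      · have : x = s := by omega
        subst this
        rw [get2_set2_same _ _ _ _ (by omega) (by rw [hr 0 (by omega)]; omega), hv]
    have hval1 : ∀ dp' b, s + 1 ≤ b → (∀ x, x < b → get2 dp' 0 x = g x) → val dp' b = g b :=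
      fun dp' b hb hx => hval dp' b (by omega) hx
    obtain ⟨c1, c2, c3, c4⟩ := ih (s+1) _ hval1 hl1 hr1 (by omega) hreads1
    refine ⟨c1, c2, fun b hb => ?_, fun a b hc => ?_⟩
    · exact c3 b (by omega)
    · have step1 : get2 ((List.range' (s+1) cnt).foldl (fun dp j => set2 dp 0 j (val dp j)) (set2 dp 0 s (val dp s))) a b
          = get2 (set2 dp 0 s (val dp s)) a b := by
        apply c4
        rcases hc with h | h | h
        · exact Or.inl h
        · exact Or.inr (Or.inl (by omega))
        · exact Or.inr (Or.inr (by omega))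
      rw [step1, get2_set2_ne]
      rcases hc with h | h | h
      · exact Or.inl h
      · exact Or.inr (by omega)
      · exact Or.inr (by omega)

theorem char_body_eq (w1 w2 : List Char) (m n : Nat) (dp0 : List (List Int)) :
    (List.range' 1 m).foldl (fun dp i => (List.range' 1 n).foldl (fun dp j =>
      if w1[i-1]? = w2[j-1]? then
        set2 dp i j (get2 dp (i-1) (j-1))
      else
        set2 dp i j (1 + min (get2 dp (i-1) j) (min (get2 dp i (j-1)) (get2 dp (i-1) (j-1))))) dp) dp0
    = (List.range' 1 m).foldl (fun dp i => (List.range' 1 n).foldl (fun dp j =>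
      set2 dp i j ((fun up left diag (i j : Nat) =>
        if w1[i-1]? = w2[j-1]? then diag else 1 + min up (min left diag))
        (get2 dp (i-1) j) (get2 dp i (j-1)) (get2 dp (i-1) (j-1)) i j)) dp) dp0 := by
  congr 1
  funext dp i
  congr 1
  funext dp j
  by_cases h : w1[i-1]? = w2[j-1]?
  · rw [if_pos h]; simp only; rw [if_pos h]
  · rw [if_neg h]; simp only; rw [if_neg h]

theorem char_boundary (word1 word2 : String) :
    InvA (ged word1.toList word2.toList 1 (fun _ _ => 1))
      word1.toList.length word2.toList.length 0 word2.toList.length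
      ((List.range' 0 (word2.toList.length + 1)).foldl (fun dp j => set2 dp 0 j (j : Int))
        ((List.range' 0 (word1.toList.length + 1)).foldl (fun dp i => set2 dp i 0 (i : Int))
          (List.replicate (word1.toList.length + 1) (List.replicate (word2.toList.length + 1) (0:Int))))) := by
  obtain ⟨l1, r1, v1, p1⟩ := foldl_col word1.toList.length word2.toList.length
    (fun a => (a : Int)) (fun _ i => (i : Int)) (word1.toList.length + 1) 0
    (List.replicate (word1.toList.length + 1) (List.replicate (word2.toList.length + 1) (0:Int)))
    (fun _ _ _ _ => rfl) (by simp)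
    (fun x hx => rowlen_replicate _ _ x (by omega)) (by omega) (fun x hx => absurd hx (by omega))
  obtain ⟨l2, r2, v2, p2⟩ := foldl_row word1.toList.length word2.toList.length
    (fun b => (b : Int)) (fun _ j => (j : Int)) (word2.toList.length + 1) 0 _
    (fun _ _ _ _ => rfl) l1 r1 (by omega) (fun x hx => absurd hx (by omega))
  refine ⟨l2, fun a ha => r2 a ha, ?_⟩
  intro a b ha hb hcond
  have hz : ∀ x : Nat, ged word1.toList word2.toList 1 (fun _ _ => 1) 0 x = x := by
    intro x; rw [ged_zl]; omega
  have hz' : ∀ x : Nat, ged word1.toList word2.toList 1 (fun _ _ => 1) x 0 = x := by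
    intro x; rw [ged_zr]; omega
  rcases hcond with h | h | h | ⟨h, _⟩
  · subst h; rw [hz, v2 b (by omega)]
  · subst h
    by_cases h0 : a = 0
    · subst h0; rw [hz', v2 0 (by omega)]
    · rw [hz', p2 a 0 (Or.inl h0), v1 a (by omega)]
  · omega
  · subst h; rw [hz, v2 b (by omega)]

theorem editA_eq (word1 word2 : String) :
    edit_distance word1 word2 =
      ged word1.toList word2.toList 1 (fun _ _ => 1) word1.toList.length word2.toList.length := by
  simp only [edit_distance]
  rw [List.range_eq_range' (n := word1.toList.length + 1), List.range_eq_range' (n := word2.toList.length + 1)]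
  rw [char_body_eq]
  have hnest := A_nested (ged word1.toList word2.toList 1 (fun _ _ => 1))
    word1.toList.length word2.toList.length
    (fun up left diag i j => if word1.toList[i-1]? = word2.toList[j-1]? then diag
      else 1 + min up (min left diag))
    (by
      intro i j hi1 him hj1 hjn
      obtain ⟨i', rfl⟩ : ∃ i', i = i' + 1 := ⟨i - 1, by omega⟩
      obtain ⟨j', rfl⟩ : ∃ j', j = j' + 1 := ⟨j - 1, by omega⟩
      simp only [Nat.add_sub_cancel]
      rw [ged_succ]
      by_cases h : word1.toList[i']? = word2.toList[j']?
      · rw [if_pos h, if_pos h]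
      · rw [if_neg h, if_neg h]; omega)
    _ (char_boundary word1 word2)
  exact hnest.2.2 word1.toList.length word2.toList.length le_rfl le_rfl
    (Or.inr (Or.inr (Or.inr ⟨rfl, le_rfl⟩)))

-- ===== B-side: the memoized recursion computes ged =====

-- every cached value is the ged value of its key
def GoodMemo {α : Type} [DecidableEq α] (xs ys : List α) (c : Int) (r : Nat → Nat → Int)
    (memo : PySem.Dict (Nat × Nat) Int) : Prop :=
  ∀ p v, memo.get? p = some v → v = ged xs ys c r p.1 p.2

theorem goodMemo_empty {α : Type} [DecidableEq α] (xs ys : List α) (c : Int) (r : Nat → Nat → Int) :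
    GoodMemo xs ys c r PySem.Dict.empty := by
  intro p v h
  rw [PySem.Dict.get?_empty] at h
  exact absurd h (by simp)

theorem goodMemo_insert {α : Type} [DecidableEq α] (xs ys : List α) (c : Int) (r : Nat → Nat → Int)
    (memo : PySem.Dict (Nat × Nat) Int) (i j : Nat) (v : Int)
    (hm : GoodMemo xs ys c r memo) (hv : v = ged xs ys c r i j) :
    GoodMemo xs ys c r (memo.insert (i, j) v) := by
  intro p w h
  rw [PySem.Dict.get?_insert] at h
  by_cases hp : p = (i, j)
  · rw [if_pos hp] at h
    cases h
    rw [hp]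
    exact hv
  · rw [if_neg hp] at h
    exact hm p w h

theorem edGo_correct (w1 w2 : List Char) :
    ∀ (k i j : Nat), i + j ≤ k → ∀ memo, GoodMemo w1 w2 1 (fun _ _ => 1) memo →
      (edGo w1 w2 i j memo).1 = ged w1 w2 1 (fun _ _ => 1) i j ∧
      GoodMemo w1 w2 1 (fun _ _ => 1) (edGo w1 w2 i j memo).2 := by
  intro k
  induction k with
  | zero =>
    intro i j hij memo hm
    have hi : i = 0 := by omega
    have hj : j = 0 := by omega
    subst hi; subst hj
    rw [edGo, ged_zl]
    exact ⟨by norm_num, hm⟩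
  | succ k ih =>
    intro i j hij memo hm
    match i, j with
    | 0, j =>
      rw [edGo, ged_zl]
      exact ⟨by omega, hm⟩
    | i+1, 0 =>
      rw [edGo, ged_zr]
      exact ⟨by push_cast; ring, hm⟩
    | i+1, j+1 =>
      rw [edGo]
      cases hget : PySem.Dict.get? memo (i+1, j+1) with
      | some v =>
        simp only []
        exact ⟨hm _ _ hget, hm⟩
      | none =>
        simp only []
        by_cases hc : w1[i]? = w2[j]?
        · rw [if_pos hc]
          obtain ⟨h1, h2⟩ := ih i j (by omega) memo hm
          have hstep := h1.trans (show ged w1 w2 1 (fun _ _ => 1) (i+1) (j+1)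
              = ged w1 w2 1 (fun _ _ => 1) i j by rw [ged_succ, if_pos hc]).symm
          exact ⟨hstep, goodMemo_insert _ _ _ _ _ _ _ _ h2 hstep⟩
        · rw [if_neg hc]
          obtain ⟨h1, hm1⟩ := ih i (j+1) (by omega) memo hm
          obtain ⟨h2, hm2⟩ := ih (i+1) j (by omega) _ hm1
          obtain ⟨h3, hm3⟩ := ih i j (by omega) _ hm2
          have hval : 1 + min (edGo w1 w2 i (j+1) memo).1
              (min (edGo w1 w2 (i+1) j (edGo w1 w2 i (j+1) memo).2).1
                (edGo w1 w2 i j (edGo w1 w2 (i+1) j (edGo w1 w2 i (j+1) memo).2).2).1)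
              = ged w1 w2 1 (fun _ _ => 1) (i+1) (j+1) := by
            rw [h1, h2, h3, ged_succ, if_neg hc]
            omega
          exact ⟨hval, goodMemo_insert _ _ _ _ _ _ _ _ hm3 hval⟩

theorem edit_eq (word1 word2 : String) : edit_distance word1 word2 = edit_distance_alt word1 word2 := by
  rw [editA_eq]
  unfold edit_distance_alt
  exact ((edGo_correct word1.toList word2.toList (word1.toList.length + word2.toList.length)
    word1.toList.length word2.toList.length le_rfl PySem.Dict.empty
    (goodMemo_empty _ _ _ _)).1).symm

theorem pdGo_correct (ws1 ws2 : List String) :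
    ∀ (k i j : Nat), i + j ≤ k → ∀ memo,
      GoodMemo ws1 ws2 2 (fun i j => max 1 (edit_distance (ws1.getD (i-1) "") (ws2.getD (j-1) ""))) memo →
      (pdGo ws1 ws2 i j memo).1
          = ged ws1 ws2 2 (fun i j => max 1 (edit_distance (ws1.getD (i-1) "") (ws2.getD (j-1) ""))) i j ∧
      GoodMemo ws1 ws2 2 (fun i j => max 1 (edit_distance (ws1.getD (i-1) "") (ws2.getD (j-1) "")))
        (pdGo ws1 ws2 i j memo).2 := by
  intro k
  induction k with
  | zero =>
    intro i j hij memo hm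
    have hi : i = 0 := by omega
    have hj : j = 0 := by omega
    subst hi; subst hj
    rw [pdGo, ged_zl]
    exact ⟨by norm_num, hm⟩
  | succ k ih =>
    intro i j hij memo hm
    match i, j with
    | 0, j =>
      rw [pdGo, ged_zl]
      exact ⟨rfl, hm⟩
    | i+1, 0 =>
      rw [pdGo, ged_zr]
      exact ⟨by push_cast; ring, hm⟩
    | i+1, j+1 =>
      rw [pdGo]
      cases hget : PySem.Dict.get? memo (i+1, j+1) with
      | some v =>
        simp only []
        exact ⟨hm _ _ hget, hm⟩
      | none =>
        simp only []
        by_cases hc : ws1[i]? = ws2[j]?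
        · rw [if_pos hc]
          obtain ⟨h1, h2⟩ := ih i j (by omega) memo hm
          have hstep := h1.trans (show ged ws1 ws2 2 (fun i j => max 1 (edit_distance (ws1.getD (i-1) "") (ws2.getD (j-1) ""))) (i+1) (j+1)
              = ged ws1 ws2 2 (fun i j => max 1 (edit_distance (ws1.getD (i-1) "") (ws2.getD (j-1) ""))) i j by rw [ged_succ, if_pos hc]).symm
          exact ⟨hstep, goodMemo_insert _ _ _ _ _ _ _ _ h2 hstep⟩
        · rw [if_neg hc]
          obtain ⟨h1, hm1⟩ := ih i (j+1) (by omega) memo hm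
          obtain ⟨h2, hm2⟩ := ih (i+1) j (by omega) _ hm1
          obtain ⟨h3, hm3⟩ := ih i j (by omega) _ hm2
          have hsub : max 1 (edit_distance_alt (ws1.getD i "") (ws2.getD j ""))
              = max 1 (edit_distance (ws1.getD ((i+1)-1) "") (ws2.getD ((j+1)-1) "")) := by
            simp [edit_eq]
          have hval : min ((pdGo ws1 ws2 i (j+1) memo).1 + 2)
              (min ((pdGo ws1 ws2 (i+1) j (pdGo ws1 ws2 i (j+1) memo).2).1 + 2)
                ((pdGo ws1 ws2 i j (pdGo ws1 ws2 (i+1) j (pdGo ws1 ws2 i (j+1) memo).2).2).1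
                  + max 1 (edit_distance_alt (ws1.getD i "") (ws2.getD j ""))))
              = ged ws1 ws2 2 (fun i j => max 1 (edit_distance (ws1.getD (i-1) "") (ws2.getD (j-1) ""))) (i+1) (j+1) := by
            rw [h1, h2, h3, hsub, ged_succ, if_neg hc]
          exact ⟨hval, goodMemo_insert _ _ _ _ _ _ _ _ hm3 hval⟩

theorem phrase_body_eq (ws1 ws2 : List String) (m n : Nat) (dp0 : List (List Int)) :
    (List.range' 1 m).foldl (fun dp i => (List.range' 1 n).foldl (fun dp j =>
      if ws1[i-1]? = ws2[j-1]? then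
        set2 dp i j (get2 dp (i-1) (j-1))
      else
        let replace_cost := edit_distance (ws1.getD (i-1) "") (ws2.getD (j-1) "")
        let replace_cost := max 1 replace_cost
        set2 dp i j (min (get2 dp (i-1) j + 2)
          (min (get2 dp i (j-1) + 2) (get2 dp (i-1) (j-1) + replace_cost)))) dp) dp0
    = (List.range' 1 m).foldl (fun dp i => (List.range' 1 n).foldl (fun dp j =>
      set2 dp i j ((fun up left diag (i j : Nat) =>
        if ws1[i-1]? = ws2[j-1]? then diag
        else min (up + 2) (min (left + 2) (diag + max 1 (edit_distance (ws1.getD (i-1) "") (ws2.getD (j-1) "")))))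
        (get2 dp (i-1) j) (get2 dp i (j-1)) (get2 dp (i-1) (j-1)) i j)) dp) dp0 := by
  congr 1
  funext dp i
  congr 1
  funext dp j
  by_cases h : ws1[i-1]? = ws2[j-1]?
  · rw [if_pos h]; simp only; rw [if_pos h]
  · rw [if_neg h]; simp only; rw [if_neg h]

theorem phrase_boundary (ws1 ws2 : List String) :
    InvA (ged ws1 ws2 2 (fun i j => max 1 (edit_distance (ws1.getD (i-1) "") (ws2.getD (j-1) ""))))
      ws1.length ws2.length 0 ws2.length
      ((List.range' 1 ws2.length).foldl (fun dp j => set2 dp 0 j (get2 dp 0 (j-1) + 2))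
        ((List.range' 1 ws1.length).foldl (fun dp i => set2 dp i 0 (get2 dp (i-1) 0 + 2))
          (List.replicate (ws1.length + 1) (List.replicate (ws2.length + 1) (0:Int))))) := by
  obtain ⟨l1, r1, v1, p1⟩ := foldl_col ws1.length ws2.length
    (fun a => 2 * (a : Int)) (fun dp i => get2 dp (i-1) 0 + 2) ws1.length 1
    (List.replicate (ws1.length + 1) (List.replicate (ws2.length + 1) (0:Int)))
    (by
      intro dp' a ha hx
      simp only at hx ⊢
      rw [hx (a-1) (by omega)]
      have : ((a - 1 : Nat) : Int) = (a : Int) - 1 := by omega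
      rw [this]; ring)
    (by simp)
    (fun x hx => rowlen_replicate _ _ x (by omega)) (by omega)
    (by
      intro x hx
      have : x = 0 := by omega
      subst this
      rw [get2_replicate]; simp)
  obtain ⟨l2, r2, v2, p2⟩ := foldl_row ws1.length ws2.length
    (fun b => 2 * (b : Int)) (fun dp j => get2 dp 0 (j-1) + 2) ws2.length 1 _
    (by
      intro dp' b hb hx
      simp only at hx ⊢
      rw [hx (b-1) (by omega)]
      have : ((b - 1 : Nat) : Int) = (b : Int) - 1 := by omega
      rw [this]; ring)
    l1 r1 (by omega)
    (by
      intro x hx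
      have : x = 0 := by omega
      subst this
      rw [p1 0 0 (Or.inr (Or.inl (by omega))), get2_replicate]; simp)
  refine ⟨l2, fun a ha => r2 a ha, ?_⟩
  intro a b ha hb hcond
  have hz : ∀ x : Nat, ged ws1 ws2 2 (fun i j => max 1 (edit_distance (ws1.getD (i-1) "") (ws2.getD (j-1) ""))) 0 x = 2 * (x : Int) := fun x => ged_zl _ _ _ _ x
  have hz' : ∀ x : Nat, ged ws1 ws2 2 (fun i j => max 1 (edit_distance (ws1.getD (i-1) "") (ws2.getD (j-1) ""))) x 0 = 2 * (x : Int) := fun x => ged_zr _ _ _ _ x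
  rcases hcond with h | h | h | ⟨h, _⟩
  · subst h; rw [hz, v2 b (by omega)]
  · subst h
    by_cases h0 : a = 0
    · subst h0; rw [hz', v2 0 (by omega)]
    · rw [hz', p2 a 0 (Or.inl h0), v1 a (by omega)]
  · omega
  · subst h; rw [hz, v2 b (by omega)]

theorem phraseA_eq (phrase1 phrase2 : String) :
    phrase_edit_distance phrase1 phrase2 =
      ged (PySem.Str.split₀ (PySem.Str.strip phrase1)) (PySem.Str.split₀ (PySem.Str.strip phrase2)) 2
        (fun i j => max 1 (edit_distance ((PySem.Str.split₀ (PySem.Str.strip phrase1)).getD (i-1) "")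
          ((PySem.Str.split₀ (PySem.Str.strip phrase2)).getD (j-1) "")))
        (PySem.Str.split₀ (PySem.Str.strip phrase1)).length (PySem.Str.split₀ (PySem.Str.strip phrase2)).length := by
  simp only [phrase_edit_distance]
  rw [phrase_body_eq]
  have hnest := A_nested
    (ged (PySem.Str.split₀ (PySem.Str.strip phrase1)) (PySem.Str.split₀ (PySem.Str.strip phrase2)) 2
      (fun i j => max 1 (edit_distance ((PySem.Str.split₀ (PySem.Str.strip phrase1)).getD (i-1) "")
        ((PySem.Str.split₀ (PySem.Str.strip phrase2)).getD (j-1) ""))))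
    (PySem.Str.split₀ (PySem.Str.strip phrase1)).length (PySem.Str.split₀ (PySem.Str.strip phrase2)).length
    (fun up left diag (i j : Nat) =>
      if (PySem.Str.split₀ (PySem.Str.strip phrase1))[i-1]? = (PySem.Str.split₀ (PySem.Str.strip phrase2))[j-1]? then diag
      else min (up + 2) (min (left + 2) (diag + max 1 (edit_distance ((PySem.Str.split₀ (PySem.Str.strip phrase1)).getD (i-1) "")
        ((PySem.Str.split₀ (PySem.Str.strip phrase2)).getD (j-1) "")))))
    (by
      intro i j hi1 him hj1 hjn
      obtain ⟨i', rfl⟩ : ∃ i', i = i' + 1 := ⟨i - 1, by omega⟩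
      obtain ⟨j', rfl⟩ : ∃ j', j = j' + 1 := ⟨j - 1, by omega⟩
      simp only [Nat.add_sub_cancel]
      rw [ged_succ]
      by_cases h : (PySem.Str.split₀ (PySem.Str.strip phrase1))[i']? = (PySem.Str.split₀ (PySem.Str.strip phrase2))[j']?
      · rw [if_pos h, if_pos h]
      · rw [if_neg h, if_neg h]; simp only [Nat.add_sub_cancel])
    _ (phrase_boundary _ _)
  exact hnest.2.2 _ _ le_rfl le_rfl (Or.inr (Or.inr (Or.inr ⟨rfl, le_rfl⟩)))

theorem phraseB_eq (phrase1 phrase2 : String) :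
    phrase_edit_distance_alt phrase1 phrase2 =
      ged (PySem.Str.split₀ (PySem.Str.strip phrase1)) (PySem.Str.split₀ (PySem.Str.strip phrase2)) 2
        (fun i j => max 1 (edit_distance ((PySem.Str.split₀ (PySem.Str.strip phrase1)).getD (i-1) "")
          ((PySem.Str.split₀ (PySem.Str.strip phrase2)).getD (j-1) "")))
        (PySem.Str.split₀ (PySem.Str.strip phrase1)).length (PySem.Str.split₀ (PySem.Str.strip phrase2)).length := by
  unfold phrase_edit_distance_alt
  exact (pdGo_correct _ _ ((PySem.Str.split₀ (PySem.Str.strip phrase1)).length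
    + (PySem.Str.split₀ (PySem.Str.strip phrase2)).length) _ _ le_rfl PySem.Dict.empty
    (goodMemo_empty _ _ _ _)).1

-- ===== VERDICT (by name: the statement is the Claim_ definition above) =====
theorem phrase_edit_distance_spec : Claim_equal_phrase_edit_distance := by
  intro phrase1 phrase2 _
  unfold Spec_phrase_edit_distance
  rw [phraseA_eq, phraseB_eq]
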